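-- pv_equiv track=rewrite | github.com/mqtik/mate-skills-registry | scripts/aggregate.py | _infer_categories
-- ===== SOURCE A (Python) =====
-- def _infer_categories(desc: str) -> list[str]:
--     desc_lower = desc.lower()
--     cats = []
--     if any(w in desc_lower for w in ["code", "develop", "build", "api", "sdk", "frontend", "web"]):
--         cats.append("development")
--     if any(w in desc_lower for w in ["design", "art", "visual", "style", "theme"]):
--         cats.append("design")
--     if any(w in desc_lower for w in ["document", "pdf", "docx", "pptx", "xlsx", "spreadsheet"]):
--         cats.append("documents")
--     if any(w in desc_lower for w in ["write", "comms", "report"]):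
--         cats.append("writing")
--     if any(w in desc_lower for w in ["test", "playwright", "eval"]):
--         cats.append("testing")
--     if any(w in desc_lower for w in ["workflow", "automat", "productivity"]):
--         cats.append("productivity")
--     if any(w in desc_lower for w in ["slack", "discord", "telegram", "message"]):
--         cats.append("messaging")
--     return cats or ["general"]
-- ===== SOURCE B (Python) =====
-- _TABLE = [
--     ("code", "development"), ("develop", "development"), ("build", "development"),
--     ("api", "development"), ("sdk", "development"), ("frontend", "development"),
--     ("web", "development"),
--     ("design", "design"), ("art", "design"), ("visual", "design"),
--     ("style", "design"), ("theme", "design"),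
--     ("document", "documents"), ("pdf", "documents"), ("docx", "documents"),
--     ("pptx", "documents"), ("xlsx", "documents"), ("spreadsheet", "documents"),
--     ("write", "writing"), ("comms", "writing"), ("report", "writing"),
--     ("test", "testing"), ("playwright", "testing"), ("eval", "testing"),
--     ("workflow", "productivity"), ("automat", "productivity"), ("productivity", "productivity"),
--     ("slack", "messaging"), ("discord", "messaging"), ("telegram", "messaging"),
--     ("message", "messaging"),
-- ]
--
-- _ORDER = ["development", "design", "documents", "writing",
--           "testing", "productivity", "messaging"]
--
--
-- def _infer_categories(desc: str) -> list[str]: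
--     # Multi-pattern scan: walk the text once position by position; at each
--     # position, any keyword whose first character matches is tested as a
--     # prefix of the remaining text.  Correct because a nonempty keyword is a
--     # substring of the text iff it starts at some position.
--     d = desc.lower()
--     hits = set()
--     for i in range(len(d)):
--         ch = d[i]
--         for kw, cat in _TABLE:
--             if kw[0] == ch and d.startswith(kw, i):
--                 hits.add(cat)
--     out = [c for c in _ORDER if c in hits]
--     return out or ["general"]
-- ===== Notes on version B (the rewrite author's own statement) =====
-- stated objective: alternative
-- what changed: Inverts the traversal: instead of seven per-category any() substring tests, B runs an explicit multi-pattern scan over the text's positions, testing keywords with a matching first character as prefixes of the remaining text and collecting hit categories in a set, then emits them in canonical order.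
import Mathlib
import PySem

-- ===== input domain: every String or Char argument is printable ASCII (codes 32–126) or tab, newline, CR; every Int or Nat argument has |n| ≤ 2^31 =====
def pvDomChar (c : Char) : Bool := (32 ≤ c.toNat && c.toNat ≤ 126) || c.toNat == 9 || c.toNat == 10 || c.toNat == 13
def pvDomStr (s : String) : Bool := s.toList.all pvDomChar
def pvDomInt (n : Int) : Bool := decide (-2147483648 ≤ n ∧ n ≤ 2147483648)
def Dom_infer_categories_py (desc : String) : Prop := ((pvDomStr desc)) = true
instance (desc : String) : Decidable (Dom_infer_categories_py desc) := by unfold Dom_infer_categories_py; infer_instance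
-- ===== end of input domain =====

-- B inverts the traversal: a single multi-pattern scan over the text's positions
-- (keywords tested as prefixes where their first character matches), instead of
-- A's seven per-category any() substring tests (alternative algorithm).

-- ===== PORT A =====
def infer_categories_py (desc : String) : List String :=
  let desc_lower := PySem.Str.lower desc
  let cats : List String := []
  let cats := if (["code", "develop", "build", "api", "sdk", "frontend", "web"].any
      (fun w => PySem.Str.isIn w desc_lower)) then cats ++ ["development"] else cats
  let cats := if (["design", "art", "visual", "style", "theme"].any
      (fun w => PySem.Str.isIn w desc_lower)) then cats ++ ["design"] else cats
  let cats := if (["document", "pdf", "docx", "pptx", "xlsx", "spreadsheet"].any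
      (fun w => PySem.Str.isIn w desc_lower)) then cats ++ ["documents"] else cats
  let cats := if (["write", "comms", "report"].any
      (fun w => PySem.Str.isIn w desc_lower)) then cats ++ ["writing"] else cats
  let cats := if (["test", "playwright", "eval"].any
      (fun w => PySem.Str.isIn w desc_lower)) then cats ++ ["testing"] else cats
  let cats := if (["workflow", "automat", "productivity"].any
      (fun w => PySem.Str.isIn w desc_lower)) then cats ++ ["productivity"] else cats
  let cats := if (["slack", "discord", "telegram", "message"].any
      (fun w => PySem.Str.isIn w desc_lower)) then cats ++ ["messaging"] else cats
  if cats = [] then ["general"] else cats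

-- ===== PORT B =====
-- Source B's flat keyword→category table, in the same order
def pvTable : List (String × String) :=
  [("code", "development"), ("develop", "development"), ("build", "development"),
   ("api", "development"), ("sdk", "development"), ("frontend", "development"),
   ("web", "development"),
   ("design", "design"), ("art", "design"), ("visual", "design"),
   ("style", "design"), ("theme", "design"),
   ("document", "documents"), ("pdf", "documents"), ("docx", "documents"),
   ("pptx", "documents"), ("xlsx", "documents"), ("spreadsheet", "documents"),
   ("write", "writing"), ("comms", "writing"), ("report", "writing"),
   ("test", "testing"), ("playwright", "testing"), ("eval", "testing"),
   ("workflow", "productivity"), ("automat", "productivity"), ("productivity", "productivity"),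
   ("slack", "messaging"), ("discord", "messaging"), ("telegram", "messaging"),
   ("message", "messaging")]

def pvOrder : List String :=
  ["development", "design", "documents", "writing", "testing", "productivity", "messaging"]

-- the body of Source B's inner for-loop at position i of the lowered text dl;
-- kw[0] == d[i] is ported on toList (exact: both indices are in range here),
-- d.startswith(kw, i) is ported as prefix-of-drop (exact for 0 ≤ i ≤ len(d))
def pvScanStep (dl : List Char) (i : Nat) (hits : PySem.Set String)
    (p : String × String) : PySem.Set String :=
  if p.1.toList.head? == dl[i]? && PySem.Chars.startswith (dl.drop i) p.1.toList
  then hits.add p.2 else hits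

def infer_categories_py_alt (desc : String) : List String :=
  let dl := (PySem.Str.lower desc).toList
  let hits := (List.range dl.length).foldl
    (fun hits i => pvTable.foldl (pvScanStep dl i) hits) PySem.Set.empty
  let out := pvOrder.filter (fun c => hits.contains c)
  if out = [] then ["general"] else out

-- ===== PRECONDITION & SPEC =====
def Spec_infer_categories_py (desc : String) (out : List String) : Prop := out = infer_categories_py_alt desc
instance (desc : String) (out : List String) : Decidable (Spec_infer_categories_py desc out) := by unfold Spec_infer_categories_py; infer_instance

-- ===== CLAIM (what is proved, stated in full; the proofs are below) =====
def Claim_equal_infer_categories_py : Prop := ∀ (desc : String), Dom_infer_categories_py desc → Spec_infer_categories_py desc (infer_categories_py desc)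

-- ===== LEMMAS AND PROOFS =====

-- every keyword in the table is nonempty
lemma pv_table_ne : ∀ p ∈ pvTable, p.1.toList ≠ [] := by decide

-- membership in a fold that conditionally adds
lemma pv_mem_foldl_addIf {α : Type} (l : List α) (P : α → Bool) (f : α → String)
    (s : PySem.Set String) (c : String) :
    c ∈ l.foldl (fun s a => if P a then s.add (f a) else s) s ↔
      c ∈ s ∨ ∃ a ∈ l, P a ∧ f a = c := by
  induction l generalizing s with
  | nil => simp
  | cons a l ih =>
    simp only [List.foldl_cons, ih, List.exists_mem_cons_iff]
    by_cases h : P a = true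
    · rw [if_pos h]
      simp only [PySem.Set.mem_add, h]
      tauto
    · rw [if_neg h]
      tauto

-- membership in the double scan fold
lemma pv_mem_scan (dl : List Char) (l : List Nat) (s : PySem.Set String) (c : String) :
    c ∈ l.foldl (fun hits i => pvTable.foldl (pvScanStep dl i) hits) s ↔
      c ∈ s ∨ ∃ i ∈ l, ∃ p ∈ pvTable,
        (p.1.toList.head? == dl[i]? && PySem.Chars.startswith (dl.drop i) p.1.toList) = true
        ∧ p.2 = c := by
  induction l generalizing s with
  | nil => simp
  | cons i l ih =>
    have hstep : ∀ s, pvTable.foldl (pvScanStep dl i) s =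
        pvTable.foldl (fun s p =>
          if (p.1.toList.head? == dl[i]? && PySem.Chars.startswith (dl.drop i) p.1.toList)
          then s.add p.2 else s) s := fun s => rfl
    simp only [List.foldl_cons, ih, hstep, pv_mem_foldl_addIf, List.exists_mem_cons_iff]
    rw [or_assoc]

-- the scan condition over all positions equals Python's 'kw in d' (kw nonempty)
lemma pv_scan_iff_isIn (dl : List Char) (kw : String) (hkw : kw.toList ≠ []) :
    (∃ i ∈ List.range dl.length,
        (kw.toList.head? == dl[i]? && PySem.Chars.startswith (dl.drop i) kw.toList) = true) ↔
      PySem.Chars.isIn kw.toList dl = true := by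
  rw [← PySem.Chars.exists_prefix_drop_iff_isIn]
  constructor
  · rintro ⟨i, _, h⟩
    rw [Bool.and_eq_true] at h
    exact ⟨i, (PySem.Chars.startswith_iff _ _).mp h.2⟩
  · rintro ⟨j, hpre⟩
    have hne : dl.drop j ≠ [] := by
      intro hnil
      rw [hnil, List.prefix_nil] at hpre
      exact hkw hpre
    have hj : j < dl.length := by
      by_contra h
      exact hne (List.drop_eq_nil_of_le (by omega))
    refine ⟨j, List.mem_range.mpr hj, ?_⟩
    rw [Bool.and_eq_true]
    refine ⟨?_, (PySem.Chars.startswith_iff _ _).mpr hpre⟩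
    have hhead : kw.toList.head? = (dl.drop j).head? := by
      cases hk : kw.toList with
      | nil => exact absurd hk hkw
      | cons a t =>
        rw [hk] at hpre
        obtain ⟨r, hr⟩ := hpre
        rw [← hr]
        simp
    rw [hhead, List.head?_drop]
    simp

-- hits.contains c as a test over the flat table
lemma pv_hits_contains (dl : List Char) (c : String) :
    (((List.range dl.length).foldl
        (fun hits i => pvTable.foldl (pvScanStep dl i) hits)
        PySem.Set.empty).contains c) =
      pvTable.any (fun p => p.2 == c && PySem.Chars.isIn p.1.toList dl) := by
  rw [Bool.eq_iff_iff, PySem.Set.contains_iff, pv_mem_scan, List.any_eq_true]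
  have hnil : ¬ (c ∈ (PySem.Set.empty : PySem.Set String)) := by
    simp [PySem.Set.empty]
  constructor
  · rintro (h | ⟨i, hi, p, hp, hcond, hc⟩)
    · exact absurd h hnil
    · refine ⟨p, hp, ?_⟩
      rw [Bool.and_eq_true]
      exact ⟨by simp [hc],
        (pv_scan_iff_isIn dl p.1 (pv_table_ne p hp)).mp ⟨i, hi, hcond⟩⟩
  · rintro ⟨p, hp, h⟩
    rw [Bool.and_eq_true] at h
    obtain ⟨i, hi, hcond⟩ := (pv_scan_iff_isIn dl p.1 (pv_table_ne p hp)).mpr h.2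
    exact Or.inr ⟨i, hi, p, hp, hcond, by simpa using h.1⟩

-- per category, the flat-table test equals A's any() over that category's keywords
lemma pv_group (dl : List Char) (c : String) (ws : List String)
    (hw : pvTable.filter (fun p => p.2 == c) = ws.map (fun w => (w, c))) :
    pvTable.any (fun p => p.2 == c && PySem.Chars.isIn p.1.toList dl) =
      ws.any (fun w => PySem.Chars.isIn w.toList dl) := by
  have h1 : pvTable.any (fun p => p.2 == c && PySem.Chars.isIn p.1.toList dl) =
      (pvTable.filter (fun p => p.2 == c)).any (fun p => PySem.Chars.isIn p.1.toList dl) := by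
    rw [List.any_filter]
  rw [h1, hw, List.any_map]
  rfl

lemma pv_g1 (dl : List Char) :
    pvTable.any (fun p => p.2 == "development" && PySem.Chars.isIn p.1.toList dl) =
      ["code", "develop", "build", "api", "sdk", "frontend", "web"].any
        (fun w => PySem.Chars.isIn w.toList dl) :=
  pv_group dl "development" ["code", "develop", "build", "api", "sdk", "frontend", "web"] rfl

lemma pv_g2 (dl : List Char) :
    pvTable.any (fun p => p.2 == "design" && PySem.Chars.isIn p.1.toList dl) =
      ["design", "art", "visual", "style", "theme"].any
        (fun w => PySem.Chars.isIn w.toList dl) :=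
  pv_group dl "design" ["design", "art", "visual", "style", "theme"] rfl

lemma pv_g3 (dl : List Char) :
    pvTable.any (fun p => p.2 == "documents" && PySem.Chars.isIn p.1.toList dl) =
      ["document", "pdf", "docx", "pptx", "xlsx", "spreadsheet"].any
        (fun w => PySem.Chars.isIn w.toList dl) :=
  pv_group dl "documents" ["document", "pdf", "docx", "pptx", "xlsx", "spreadsheet"] rfl

lemma pv_g4 (dl : List Char) :
    pvTable.any (fun p => p.2 == "writing" && PySem.Chars.isIn p.1.toList dl) =
      ["write", "comms", "report"].any (fun w => PySem.Chars.isIn w.toList dl) :=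
  pv_group dl "writing" ["write", "comms", "report"] rfl

lemma pv_g5 (dl : List Char) :
    pvTable.any (fun p => p.2 == "testing" && PySem.Chars.isIn p.1.toList dl) =
      ["test", "playwright", "eval"].any (fun w => PySem.Chars.isIn w.toList dl) :=
  pv_group dl "testing" ["test", "playwright", "eval"] rfl

lemma pv_g6 (dl : List Char) :
    pvTable.any (fun p => p.2 == "productivity" && PySem.Chars.isIn p.1.toList dl) =
      ["workflow", "automat", "productivity"].any (fun w => PySem.Chars.isIn w.toList dl) :=
  pv_group dl "productivity" ["workflow", "automat", "productivity"] rfl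

lemma pv_g7 (dl : List Char) :
    pvTable.any (fun p => p.2 == "messaging" && PySem.Chars.isIn p.1.toList dl) =
      ["slack", "discord", "telegram", "message"].any (fun w => PySem.Chars.isIn w.toList dl) :=
  pv_group dl "messaging" ["slack", "discord", "telegram", "message"] rfl

-- A's body with its seven any() tests abstracted as booleans (defeq to A's body)
def pvABody (b1 b2 b3 b4 b5 b6 b7 : Bool) : List String :=
  let cats : List String := []
  let cats := if b1 then cats ++ ["development"] else cats
  let cats := if b2 then cats ++ ["design"] else cats
  let cats := if b3 then cats ++ ["documents"] else cats
  let cats := if b4 then cats ++ ["writing"] else cats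
  let cats := if b5 then cats ++ ["testing"] else cats
  let cats := if b6 then cats ++ ["productivity"] else cats
  let cats := if b7 then cats ++ ["messaging"] else cats
  if cats = [] then ["general"] else cats

-- B's canonical-order filter with the same seven tests abstracted as booleans
def pvBBody (b1 b2 b3 b4 b5 b6 b7 : Bool) : List String :=
  let t7 : List String := if b7 then ["messaging"] else []
  let t6 := if b6 then "productivity" :: t7 else t7
  let t5 := if b5 then "testing" :: t6 else t6
  let t4 := if b4 then "writing" :: t5 else t5
  let t3 := if b3 then "documents" :: t4 else t4
  let t2 := if b2 then "design" :: t3 else t3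
  let out := if b1 then "development" :: t2 else t2
  if out = [] then ["general"] else out

-- the two emissions agree for every combination of hits
lemma pv_emit (b1 b2 b3 b4 b5 b6 b7 : Bool) :
    pvABody b1 b2 b3 b4 b5 b6 b7 = pvBBody b1 b2 b3 b4 b5 b6 b7 := by
  revert b1 b2 b3 b4 b5 b6 b7; decide

-- ===== VERDICT (by name: the statement is the Claim_ definition above) =====
theorem infer_categories_py_spec : Claim_equal_infer_categories_py := by
  intro desc _
  unfold Spec_infer_categories_py
  have hA : infer_categories_py desc =
      pvABody
        (["code", "develop", "build", "api", "sdk", "frontend", "web"].any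
          (fun w => PySem.Str.isIn w (PySem.Str.lower desc)))
        (["design", "art", "visual", "style", "theme"].any
          (fun w => PySem.Str.isIn w (PySem.Str.lower desc)))
        (["document", "pdf", "docx", "pptx", "xlsx", "spreadsheet"].any
          (fun w => PySem.Str.isIn w (PySem.Str.lower desc)))
        (["write", "comms", "report"].any
          (fun w => PySem.Str.isIn w (PySem.Str.lower desc)))
        (["test", "playwright", "eval"].any
          (fun w => PySem.Str.isIn w (PySem.Str.lower desc)))
        (["workflow", "automat", "productivity"].any
          (fun w => PySem.Str.isIn w (PySem.Str.lower desc)))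
        (["slack", "discord", "telegram", "message"].any
          (fun w => PySem.Str.isIn w (PySem.Str.lower desc))) := rfl
  rw [hA, pv_emit]
  unfold infer_categories_py_alt pvBBody
  simp only [pv_hits_contains, pvOrder, List.filter_cons, List.filter_nil,
    pv_g1, pv_g2, pv_g3, pv_g4, pv_g5, pv_g6, pv_g7, PySem.Str.isIn_eq]
  rfl
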